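-- pv_equiv track=rewrite | github.com/MMC-K/multimodal-sequence-generation | pose_dataset_v2.py | stuffing_pose_data
-- ===== SOURCE A (Python) =====
-- import copy
--
-- def get_subseq_pose(pose_data, frame_idx):
--     for pose_frame in pose_data[frame_idx:]:
--         if len(pose_frame) > 0:
--             return pose_frame[0]
--     return None
--
-- def stuffing_pose_data(pose_data):
--     pose_list = []
--     prev_pose = None
--     for frame_idx, pose_frame in enumerate(pose_data):
--         if len(pose_frame) == 0:
--             if prev_pose is not None:
--                 pose_list.append(copy.deepcopy(prev_pose))
--             else:
--                 subseq_pose = get_subseq_pose(pose_data, frame_idx)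
--                 if subseq_pose is not None:
--                     pose_list.append(copy.deepcopy(subseq_pose))
--                 # If there is no prev_pose and subseq_pose, skip the frame
--         else:
--             prev_pose = copy.deepcopy(pose_frame[0])
--             pose_list.append(prev_pose)
--     return pose_list
-- ===== SOURCE B (Python) =====
-- def stuffing_pose_data(pose_data):
--     # find the first non-empty frame's pose once (O(n) total instead of rescanning per leading empty frame)
--     cur = None
--     for frame in pose_data:
--         if len(frame) > 0:
--             cur = frame[0]
--             break
--     if cur is None:
--         return []
--     out = []
--     for frame in pose_data:
--         if len(frame) > 0:
--             cur = frame[0]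
--         out.append(list(cur))
--     return out
-- ===== Notes on version B (the rewrite author's own statement) =====
-- stated objective: faster
-- what changed: B precomputes the first non-empty pose once and then runs a single carry-forward pass, instead of A's per-leading-empty-frame forward rescan over a slice.
import Mathlib
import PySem

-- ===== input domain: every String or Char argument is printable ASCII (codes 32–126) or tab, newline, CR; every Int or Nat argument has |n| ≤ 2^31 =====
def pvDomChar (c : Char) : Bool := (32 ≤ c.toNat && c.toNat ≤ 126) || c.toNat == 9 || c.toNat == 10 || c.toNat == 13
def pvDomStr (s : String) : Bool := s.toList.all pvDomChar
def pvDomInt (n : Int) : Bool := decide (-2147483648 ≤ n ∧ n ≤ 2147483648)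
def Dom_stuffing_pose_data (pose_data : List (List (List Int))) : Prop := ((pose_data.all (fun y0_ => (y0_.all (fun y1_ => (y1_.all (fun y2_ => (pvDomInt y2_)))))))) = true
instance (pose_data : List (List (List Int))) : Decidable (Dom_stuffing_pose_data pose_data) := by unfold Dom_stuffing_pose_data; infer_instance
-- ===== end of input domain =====

-- B replaces A's per-leading-empty-frame forward rescan (O(n^2)) by one precomputed
-- first non-empty pose plus a single carry-forward pass (O(n)); same return value.

-- ===== PORT A =====
-- for pose_frame in pose_data[frame_idx:]: if len(pose_frame) > 0: return pose_frame[0]; return None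
def gsp_loop : List (List (List Int)) → Option (List Int)
  | [] => none
  | f :: t => if f.length > 0 then f.head? else gsp_loop t

def get_subseq_pose (pose_data : List (List (List Int))) (frame_idx : Int) : Option (List Int) :=
  gsp_loop (PySem.List.slice pose_data (some frame_idx) none)

-- the body of A's 'for frame_idx, pose_frame in enumerate(pose_data)' loop;
-- state = (pose_list, prev_pose); deepcopy is value-identity here
def stuff_step (pose_data : List (List (List Int)))
    (st : List (List Int) × Option (List Int)) (pr : Int × List (List Int)) :
    List (List Int) × Option (List Int) :=
  if pr.2.length = 0 then
    match st.2 with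
    | some prev => (st.1 ++ [prev], st.2)
    | none =>
      match get_subseq_pose pose_data pr.1 with
      | some sp => (st.1 ++ [sp], st.2)
      | none => st
  else
    (st.1 ++ [pr.2.headD []], some (pr.2.headD []))

def stuffing_pose_data (pose_data : List (List (List Int))) : List (List Int) :=
  (List.foldl (stuff_step pose_data) ([], none) (PySem.List.enumerate pose_data 0)).1

-- ===== PORT B =====
-- B's first loop: scan for the first non-empty frame's first pose, then break
def first_pose : List (List (List Int)) → Option (List Int)
  | [] => none
  | f :: t => if f.length > 0 then f.head? else first_pose t

-- B's second loop: carry the current pose forward, emitting one pose per frame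
def alt_go (cur : List Int) : List (List (List Int)) → List (List Int)
  | [] => []
  | f :: t =>
    if f.length > 0 then f.headD [] :: alt_go (f.headD []) t
    else cur :: alt_go cur t

def stuffing_pose_data_alt (pose_data : List (List (List Int))) : List (List Int) :=
  match first_pose pose_data with
  | none => []
  | some cur => alt_go cur pose_data

-- ===== PRECONDITION & SPEC =====
def Spec_stuffing_pose_data (pose_data : List (List (List Int))) (out : List (List Int)) : Prop := out = stuffing_pose_data_alt pose_data
instance (pose_data : List (List (List Int))) (out : List (List Int)) : Decidable (Spec_stuffing_pose_data pose_data out) := by unfold Spec_stuffing_pose_data; infer_instance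

-- ===== CLAIM (what is proved, stated in full; the proofs are below) =====
def Claim_equal_stuffing_pose_data : Prop := ∀ (pose_data : List (List (List Int))), Dom_stuffing_pose_data pose_data → Spec_stuffing_pose_data pose_data (stuffing_pose_data pose_data)

-- ===== LEMMAS AND PROOFS =====

-- A's slice-based forward scan from index i is the same scan of drop i
lemma get_subseq_pose_drop (pose_data : List (List (List Int))) (i : Nat) :
    get_subseq_pose pose_data (i : Int) = gsp_loop (pose_data.drop i) := by
  unfold get_subseq_pose
  rw [PySem.List.slice_some_none, PySem.List.clampIdx_natCast]
  rcases le_total i pose_data.length with h | h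
  · rw [min_eq_left h]
  · rw [min_eq_right h, List.drop_length, List.drop_eq_nil_of_le h]

lemma gsp_loop_eq_first_pose (l : List (List (List Int))) :
    gsp_loop l = first_pose l := by
  induction l with
  | nil => rfl
  | cons f t ih => simp [gsp_loop, first_pose, ih]

-- once prev_pose is set, A's remaining loop is B's carry-forward pass
lemma foldl_some (pose_data : List (List (List Int))) (l : List (List (List Int)))
    (s : Int) (acc : List (List Int)) (p : List Int) :
    (List.foldl (stuff_step pose_data) (acc, some p) (PySem.List.enumerate l s)).1
      = acc ++ alt_go p l := by
  induction l generalizing s acc p with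
  | nil => simp [PySem.List.enumerate_nil, alt_go]
  | cons f t ih =>
    rw [PySem.List.enumerate_cons, List.foldl_cons]
    by_cases h : f.length = 0
    · simp [stuff_step, ih, alt_go, List.length_eq_zero_iff.mp h]
    · have h' : f.length > 0 := Nat.pos_of_ne_zero h
      simp [stuff_step, h, ih, alt_go, h']

-- while prev_pose is None, A fills from the first non-empty pose of the rest
lemma foldl_none (pose_data : List (List (List Int))) (l : List (List (List Int)))
    (i : Nat) (acc : List (List Int)) (hdrop : pose_data.drop i = l) :
    (List.foldl (stuff_step pose_data) (acc, none) (PySem.List.enumerate l (i : Int))).1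
      = match first_pose l with
        | none => acc
        | some q => acc ++ alt_go q l := by
  induction l generalizing i acc with
  | nil => simp [PySem.List.enumerate_nil, first_pose]
  | cons f t ih =>
    have hdrop' : pose_data.drop (i + 1) = t := by
      rw [← List.drop_drop, hdrop]; rfl
    rw [PySem.List.enumerate_cons, List.foldl_cons]
    cases f with
    | cons p r =>
      have hh : (p :: r).length > 0 := by simp
      simp only [stuff_step, List.length_cons, Nat.succ_ne_zero, List.headD_cons, reduceIte]
      rw [foldl_some pose_data t _ _ p]
      simp [first_pose, alt_go]
    | nil =>
      simp only [stuff_step, List.length_nil, reduceIte]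
      have hsub : get_subseq_pose pose_data (i : Int) = first_pose t := by
        rw [get_subseq_pose_drop, hdrop, gsp_loop_eq_first_pose]
        simp [first_pose]
      have hcast : (i : Int) + 1 = ((i + 1 : Nat) : Int) := by push_cast; ring
      rw [hsub]
      cases hfp : first_pose t with
      | none =>
        rw [hcast, ih (i + 1) acc hdrop', hfp]
        simp [first_pose, hfp]
      | some q =>
        rw [hcast, ih (i + 1) (acc ++ [q]) hdrop', hfp]
        simp [first_pose, hfp, alt_go]

-- ===== VERDICT (by name: the statement is the Claim_ definition above) =====
theorem stuffing_pose_data_spec : Claim_equal_stuffing_pose_data := by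
  intro pose_data _
  unfold Spec_stuffing_pose_data stuffing_pose_data stuffing_pose_data_alt
  have h0 : (0 : Int) = ((0 : Nat) : Int) := rfl
  rw [h0, foldl_none pose_data pose_data 0 [] (by simp)]
  cases hfp : first_pose pose_data <;> simp
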